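-- pv_equiv track=rewrite | github.com/miliar/Code_Jam_Webscraper | solutions_python/Problem_181/875.py | solve
-- ===== SOURCE A (Python) =====
-- from collections import deque
--
-- def solve(word):
--   lasts = deque([word[0]])
--   for i in range(1, len(word)):
--     ch = word[i]
--     if front_insertable(lasts, ch):
--       lasts.appendleft(ch)
--     else:
--       lasts.append(ch)
--
--   return ''.join(lasts)
--
-- def front_insertable(lasts, ch):
--   index = 0
--   while index < len(lasts):
--     if ch < lasts[index]:
--       return False
--     elif ch > lasts[index]:
--       return True
--     else:
--       index += 1
--
--   # lasts == n * [ch], doesn't matter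
--   return False
-- ===== SOURCE B (Python) =====
-- def solve(word):
--     m = word[0]
--     pre = []        # chars that went to the front, in arrival order
--     post = [m]
--     for ch in word[1:]:
--         if ch >= m:
--             pre.append(ch)
--             m = ch
--         else:
--             post.append(ch)
--     return ''.join(reversed(pre)) + ''.join(post)
-- ===== Notes on version B (the rewrite author's own statement) =====
-- stated objective: faster
-- what changed: Replaces A's per-character linear scan of the deque (front_insertable) with an O(1) comparison against a tracked running maximum, assembling the result from a front list (reversed at the end) plus a back list.
import Mathlib
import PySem

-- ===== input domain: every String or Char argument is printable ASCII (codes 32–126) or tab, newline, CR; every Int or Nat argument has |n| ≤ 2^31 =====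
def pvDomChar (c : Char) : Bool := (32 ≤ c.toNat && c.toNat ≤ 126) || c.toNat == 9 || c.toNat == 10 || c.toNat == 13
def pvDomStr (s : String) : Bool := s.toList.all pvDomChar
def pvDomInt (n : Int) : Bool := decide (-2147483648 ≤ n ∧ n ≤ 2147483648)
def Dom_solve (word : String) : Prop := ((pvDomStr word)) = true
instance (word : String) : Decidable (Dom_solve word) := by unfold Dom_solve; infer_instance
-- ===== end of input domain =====

-- B replaces A's O(n) inner scan by an O(1) comparison with the running maximum (asymptotically faster).

-- ===== PORT A =====
-- while-loop of front_insertable, index walking the deque from the front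
def frontInsertable : List Char → Char → Bool
  | [], _ => false           -- lasts == n * [ch], doesn't matter
  | x :: xs, ch =>
    if ch < x then false
    else if x < ch then true
    else frontInsertable xs ch

def solve (word : String) : String :=
  match word.toList with
  | [] => ""                 -- Python raises IndexError here; excluded by Pre_solve
  | c :: rest =>
    String.mk (rest.foldl
      (fun lasts ch => if frontInsertable lasts ch then ch :: lasts else lasts ++ [ch])
      [c])

-- ===== PORT B =====
def solve_alt (word : String) : String :=
  match word.toList with
  | [] => ""                 -- Python raises IndexError here; excluded by Pre_solve
  | c :: rest =>
    let s := rest.foldl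
      (fun (st : Char × List Char × List Char) ch =>
        if st.1 ≤ ch then (ch, st.2.1 ++ [ch], st.2.2) else (st.1, st.2.1, st.2.2 ++ [ch]))
      (c, [], [c])
    String.mk (s.2.1.reverse ++ s.2.2)

-- ===== PRECONDITION & SPEC =====
-- Pre_ excludes only the empty string, on which Python's word[0] raises IndexError in both A and B.
def Pre_solve (word : String) : Prop := word ≠ ""
instance (word : String) : Decidable (Pre_solve word) := by unfold Pre_solve; infer_instance
def pvWitness_solve : String := "cab"

def Spec_solve (word : String) (out : String) : Prop := out = solve_alt word
instance (word : String) (out : String) : Decidable (Spec_solve word out) := by unfold Spec_solve; infer_instance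

-- ===== CLAIM (what is proved, stated in full; the proofs are below) =====
def Claim_equal_solve : Prop := ∀ (word : String), Dom_solve word → Pre_solve word → Spec_solve word (solve word)

-- ===== LEMMAS AND PROOFS =====

-- if the scan returns false and ch bounds every element, then every element equals ch
theorem frontInsertable_false_all_eq {l : List Char} {ch : Char}
    (hf : frontInsertable l ch = false) (hle : ∀ x ∈ l, x ≤ ch) :
    ∀ x ∈ l, x = ch := by
  induction l with
  | nil => intro x hx; cases hx
  | cons a as ih =>
    simp only [frontInsertable] at hf
    by_cases h1 : ch < a
    · exact absurd h1 (not_lt_of_ge (hle a (List.mem_cons_self)))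
    · rw [if_neg h1] at hf
      by_cases h2 : a < ch
      · simp [h2] at hf
      · rw [if_neg h2] at hf
        have ha : a = ch := le_antisymm (le_of_not_gt h1) (le_of_not_gt h2)
        intro x hx
        rcases List.mem_cons.mp hx with rfl | hx
        · exact ha
        · exact ih hf (fun y hy => hle y (List.mem_cons_of_mem _ hy)) x hx

theorem append_eq_cons_of_all_eq {l : List Char} {ch : Char}
    (h : ∀ x ∈ l, x = ch) : l ++ [ch] = ch :: l := by
  induction l with
  | nil => rfl
  | cons a as ih =>
    have ha := h a List.mem_cons_self
    subst ha
    simp only [List.cons_append, ih (fun y hy => h y (List.mem_cons_of_mem _ hy))]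

theorem frontInsertable_lt {t : List Char} {m ch : Char} (h : ch < m) :
    frontInsertable (m :: t) ch = false := by
  simp [frontInsertable, h]

-- main loop invariant: A's deque equals pre.reverse ++ post, headed by the running max m
theorem loop_eq (rest : List Char) :
    ∀ (m : Char) (pre post : List Char),
    (∀ x ∈ pre.reverse ++ post, x ≤ m) →
    (∃ t, pre.reverse ++ post = m :: t) →
    rest.foldl
      (fun lasts ch => if frontInsertable lasts ch then ch :: lasts else lasts ++ [ch])
      (pre.reverse ++ post)
    = (let s := rest.foldl
        (fun (st : Char × List Char × List Char) ch =>
          if st.1 ≤ ch then (ch, st.2.1 ++ [ch], st.2.2) else (st.1, st.2.1, st.2.2 ++ [ch]))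
        (m, pre, post)
       s.2.1.reverse ++ s.2.2) := by
  induction rest with
  | nil => intro m pre post _ _; rfl
  | cons ch rest ih =>
    intro m pre post hle ⟨t, ht⟩
    simp only [List.foldl_cons]
    by_cases h : m ≤ ch
    · -- B prepends: new state (ch, pre ++ [ch], post)
      rw [if_pos h]
      have hstep : (if frontInsertable (pre.reverse ++ post) ch then ch :: (pre.reverse ++ post)
          else (pre.reverse ++ post) ++ [ch]) = (pre ++ [ch]).reverse ++ post := by
        rw [List.reverse_append, List.reverse_singleton, List.singleton_append, List.cons_append]
        by_cases hfi : frontInsertable (pre.reverse ++ post) ch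
        · rw [if_pos hfi]
        · rw [if_neg hfi]
          have hall : ∀ x ∈ pre.reverse ++ post, x = ch :=
            frontInsertable_false_all_eq (Bool.not_eq_true _ ▸ (by simpa using hfi))
              (fun x hx => le_trans (hle x hx) h)
          exact append_eq_cons_of_all_eq hall
      rw [hstep]
      exact ih ch (pre ++ [ch]) post
        (by
          intro x hx
          rw [List.reverse_append, List.reverse_singleton] at hx
          rcases List.mem_append.mp hx with hx | hx
          · rcases List.mem_cons.mp hx with rfl | hx
            · exact le_refl _
            · exact le_trans (hle x (List.mem_append_left _ hx)) h
          · exact le_trans (hle x (List.mem_append_right _ hx)) h)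
        ⟨pre.reverse ++ post, by
          rw [List.reverse_append, List.reverse_singleton]; rfl⟩
    · -- B appends: new state (m, pre, post ++ [ch])
      rw [if_neg h]
      have hlt : ch < m := lt_of_not_ge h
      have hstep : (if frontInsertable (pre.reverse ++ post) ch then ch :: (pre.reverse ++ post)
          else (pre.reverse ++ post) ++ [ch]) = pre.reverse ++ (post ++ [ch]) := by
        rw [ht, frontInsertable_lt hlt, if_neg (by simp)]
        rw [← ht, List.append_assoc]
      rw [hstep]
      exact ih m pre (post ++ [ch])
        (by
          intro x hx
          rcases List.mem_append.mp hx with hx | hx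
          · exact hle x (List.mem_append_left _ hx)
          · rcases List.mem_append.mp hx with hx | hx
            · exact hle x (List.mem_append_right _ hx)
            · rcases List.mem_singleton.mp hx with rfl
              exact le_of_lt hlt)
        ⟨t ++ [ch], by rw [← List.append_assoc, ht, List.cons_append]⟩

-- ===== VERDICT (by name: the statement is the Claim_ definition above) =====
theorem solve_spec : Claim_equal_solve := by
  intro word _ _
  unfold Spec_solve solve solve_alt
  cases h : word.toList with
  | nil => rfl
  | cons c rest =>
    have := loop_eq rest c [] [c]
      (by intro x hx; simp at hx; simp [hx])
      ⟨[], rfl⟩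
    simp only [List.reverse_nil, List.nil_append] at this
    dsimp only
    rw [this]
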